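-- pv_equiv track=rewrite | github.com/YutoToguchi/map_folding | Sugar_map_folding.py | stacking_order
-- ===== SOURCE A (Python) =====
-- def stacking_order(news_list):
--
--     M = len(news_list) + 1
--     N = len(news_list[0]) + 1
--     layer = [] # layer[[a,b,c,d]] a->b->c->d
--     flag12 = 0 # (上->下)  if 2->1:flag12=0   elif 1->2:flag12=1
--     flag24 = 2 # (上->下)  if 2->4:flag24=0   elif 4->2:flag12=1 initial:2
--
--     for i in range(M-1):
--         for j in range(N-1):
--
--             if j == 0: # 最初の列のとき
--
--                 if i != 0: # 最初の行でないとき前のflag24からflag12を設定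
--                     if news_list[i][j] == "n":
--                         flag12 = flag24
--                     elif news_list[i][j] == "s":
--                         flag12 = 1 - flag24
--                     elif news_list[i][j] == "w":
--                         flag12 = flag24
--                     elif news_list[i][j] == "e":
--                         flag12 = 1 - flag24
--
--                 # flag12からflag24を設定
--                 if news_list[i][j] == "n":
--                     flag24 = flag12
--                 elif news_list[i][j] == "s":
--                     flag24 = 1 - flag12
--                 elif news_list[i][j] == "w":
--                     flag24 = 1 - flag12
--                 elif news_list[i][j] == "e":
--                     flag24 = flag12
--
--
--             # flag12から層を決定
--             if flag12 == 0:
--                 if news_list[i][j] == "n":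
--                     layer.append([M*j+i+2,M*j+i+1,M*(j+1)+i+1,M*(j+1)+i+2])
--                     flag12 = 1 - flag12
--                 elif news_list[i][j] == "s":
--                     layer.append([M*(j+1)+i+1,M*(j+1)+i+2,M*j+i+2,M*j+i+1])
--                     flag12 = 1 - flag12
--                 elif news_list[i][j] == "w":
--                     layer.append([M*(j+1)+i+2,M*j+i+2,M*j+i+1,M*(j+1)+i+1])
--                 elif news_list[i][j] == "e":
--                     layer.append([M*j+i+2,M*(j+1)+i+2,M*(j+1)+i+1,M*j+i+1])
--             else:
--                 if news_list[i][j] == "n":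
--                     layer.append([M*(j+1)+i+2,M*(j+1)+i+1,M*j+i+1,M*j+i+2])
--                     flag12 = 1 - flag12
--                 elif news_list[i][j] == "s":
--                     layer.append([M*j+i+1,M*j+i+2,M*(j+1)+i+2,M*(j+1)+i+1])
--                     flag12 = 1 - flag12
--                 elif news_list[i][j] == "w":
--                     layer.append([M*(j+1)+i+1,M*j+i+1,M*j+i+2,M*(j+1)+i+2])
--                 elif news_list[i][j] == "e":
--                     layer.append([M*j+i+1,M*(j+1)+i+1,M*(j+1)+i+2,M*j+i+2])
--
--     return layer
-- ===== SOURCE B (Python) =====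
-- # Two staged passes instead of one stateful sweep: pass 1 scans only column 0
-- # (plus each row's n/s parity) to precompute every row's seed flag; pass 2 then
-- # emits each row independently, deriving the per-cell flag in closed form from
-- # the seed and the prefix parity of n/s cells, with one permutation table whose
-- # odd-flag orientation is just the reversal of the even-flag one.
--
-- _QUAD = {"n": (1, 0, 2, 3), "s": (2, 3, 1, 0), "w": (3, 1, 0, 2), "e": (1, 3, 2, 0)}
-- _FLIP12 = {"n": False, "s": True, "w": False, "e": True}   # seed flag12 from flag24
-- _FLIP24 = {"n": False, "s": True, "w": True, "e": False}   # set flag24 from flag12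
--
--
-- def _row_layers(M, i, seed, cells):
--     out = []
--     pref = 0
--     for j, ch in enumerate(cells):
--         ks = _QUAD.get(ch)
--         if ks is not None:
--             f = seed if pref % 2 == 0 else 1 - seed
--             corners = [M * j + i + 1, M * j + i + 2,
--                        M * (j + 1) + i + 1, M * (j + 1) + i + 2]
--             quad = [corners[k] for k in ks]
--             out.append(quad if f == 0 else quad[::-1])
--         if ch == "n" or ch == "s":
--             pref += 1
--     return out
--
--
-- def stacking_order(news_list):
--     M = len(news_list) + 1
--     W = len(news_list[0])
--     if W == 0:
--         return []
--     # pass 1: seed flag12 of every row, from column 0 and each row's n/s parity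
--     seeds = []
--     f12, f24 = 0, 2
--     for i, row in enumerate(news_list):
--         head = row[0]
--         if i != 0 and head in _FLIP12:
--             f12 = (1 - f24) if _FLIP12[head] else f24
--         if head in _FLIP24:
--             f24 = (1 - f12) if _FLIP24[head] else f12
--         seeds.append(f12)
--         if sum(ch in ("n", "s") for ch in row[:W]) % 2:
--             f12 = 1 - f12
--     # pass 2: rows are now independent of each other
--     return [quad
--             for i, (seed, row) in enumerate(zip(seeds, news_list))
--             for quad in _row_layers(M, i, seed, row[:W])]
-- ===== Notes on version B (the rewrite author's own statement) =====
-- stated objective: alternative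
-- what changed: A's single stateful sweep (flag12/flag24 threaded through every cell in order) is replaced by two staged passes: pass 1 scans only column 0 plus each row's n/s parity to precompute every row's seed flag, and pass 2 emits each row independently, deriving the per-cell flag in closed form from the seed and the prefix n/s parity, with one permutation table whose odd-flag orientation is the reversal of the even-flag one.
import Mathlib
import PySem

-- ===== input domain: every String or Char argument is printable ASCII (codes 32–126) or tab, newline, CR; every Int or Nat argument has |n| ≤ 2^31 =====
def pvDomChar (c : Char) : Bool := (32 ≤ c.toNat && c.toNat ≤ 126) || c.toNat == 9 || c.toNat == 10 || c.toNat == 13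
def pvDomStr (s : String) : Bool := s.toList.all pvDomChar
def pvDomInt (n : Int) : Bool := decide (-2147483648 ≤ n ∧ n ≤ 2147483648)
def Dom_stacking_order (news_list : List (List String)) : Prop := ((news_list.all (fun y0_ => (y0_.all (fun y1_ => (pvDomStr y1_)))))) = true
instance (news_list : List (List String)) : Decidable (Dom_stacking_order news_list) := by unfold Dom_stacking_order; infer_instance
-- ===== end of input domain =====

-- B replaces A's single stateful sweep by two staged passes: a seed pass over
-- column 0 (plus each row's n/s parity), then an independent per-row emission
-- whose per-cell flag is the seed xor the prefix n/s parity, with one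
-- permutation table whose odd-flag orientation is the reversal of the even one.

-- ===== PORT A =====
-- A's "j == 0" block: re-seed flag12 (only when i != 0) and set flag24
def pvSeedA (ch : String) (i f12 f24 : Int) : Int × Int :=
  let f12 := if i ≠ 0 then
      (if ch = "n" then f24 else if ch = "s" then 1 - f24
       else if ch = "w" then f24 else if ch = "e" then 1 - f24 else f12)
    else f12
  let f24 :=
    if ch = "n" then f12 else if ch = "s" then 1 - f12
    else if ch = "w" then 1 - f12 else if ch = "e" then f12 else f24
  (f12, f24)

-- A's layer-appending if/elif chain: ([] or the appended row, new flag12)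
def pvEmitA (M i j : Int) (ch : String) (f12 : Int) : List (List Int) × Int :=
  if f12 = 0 then
    if ch = "n" then ([[M*j+i+2, M*j+i+1, M*(j+1)+i+1, M*(j+1)+i+2]], 1 - f12)
    else if ch = "s" then ([[M*(j+1)+i+1, M*(j+1)+i+2, M*j+i+2, M*j+i+1]], 1 - f12)
    else if ch = "w" then ([[M*(j+1)+i+2, M*j+i+2, M*j+i+1, M*(j+1)+i+1]], f12)
    else if ch = "e" then ([[M*j+i+2, M*(j+1)+i+2, M*(j+1)+i+1, M*j+i+1]], f12)
    else ([], f12)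
  else
    if ch = "n" then ([[M*(j+1)+i+2, M*(j+1)+i+1, M*j+i+1, M*j+i+2]], 1 - f12)
    else if ch = "s" then ([[M*j+i+1, M*j+i+2, M*(j+1)+i+2, M*(j+1)+i+1]], 1 - f12)
    else if ch = "w" then ([[M*(j+1)+i+1, M*j+i+1, M*j+i+2, M*(j+1)+i+2]], f12)
    else if ch = "e" then ([[M*j+i+1, M*(j+1)+i+1, M*(j+1)+i+2, M*j+i+2]], f12)
    else ([], f12)

def pvCellA (M i j : Int) (ch : String)
    (st : List (List Int) × Int × Int) : List (List Int) × Int × Int :=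
  let s := if j = 0 then pvSeedA ch i st.2.1 st.2.2 else (st.2.1, st.2.2)
  let e := pvEmitA M i j ch s.1
  (st.1 ++ e.1, e.2, s.2)

def stacking_order (news_list : List (List String)) : List (List Int) :=
  let M : Int := (news_list.length : Int) + 1
  let N : Int := ((PySem.List.pyGetD news_list 0 []).length : Int) + 1
  ((PySem.List.pyRange 0 (M - 1) 1).foldl (fun st i =>
      (PySem.List.pyRange 0 (N - 1) 1).foldl (fun st j =>
        pvCellA M i j (PySem.List.pyGetD (PySem.List.pyGetD news_list i []) j "") st) st)
    ([], 0, 2)).1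

-- ===== PORT B =====
-- one permutation table; the odd-flag orientation is its reversal
def pvQuadTable : PySem.Dict String (List Nat) :=
  PySem.Dict.ofList [("n", [1,0,2,3]), ("s", [2,3,1,0]), ("w", [3,1,0,2]), ("e", [1,3,2,0])]
-- seed flag12 from flag24 (true: 1 - flag24) / set flag24 from flag12 (true: 1 - flag12)
def pvFlip12 : PySem.Dict String Bool :=
  PySem.Dict.ofList [("n", false), ("s", true), ("w", false), ("e", true)]
def pvFlip24 : PySem.Dict String Bool :=
  PySem.Dict.ofList [("n", false), ("s", true), ("w", true), ("e", false)]

-- one step of B's _row_layers loop; state = (out, pref)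
def pvRowCell (M i seed : Int) (st : List (List Int) × Int) (p : Int × String) :
    List (List Int) × Int :=
  let out := match PySem.Dict.get? pvQuadTable p.2 with
    | none => st.1
    | some ks =>
        let f := if PySem.Int.mod st.2 2 = 0 then seed else 1 - seed
        let corners := [M*p.1+i+1, M*p.1+i+2, M*(p.1+1)+i+1, M*(p.1+1)+i+2]
        let quad := ks.map (fun k => corners.getD k 0)
        st.1 ++ [if f = 0 then quad else quad.reverse]
  let pref := if p.2 = "n" ∨ p.2 = "s" then st.2 + 1 else st.2
  (out, pref)

-- B's _row_layers: flag in closed form from seed and prefix n/s parity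
def pvRowLayers (M i seed : Int) (cells : List String) : List (List Int) :=
  ((PySem.List.enumerate cells 0).foldl (pvRowCell M i seed) ([], 0)).1

-- one step of B's pass-1 loop; state = (seeds, f12, f24)
def pvSeedRow (W : Int) (st : List Int × Int × Int) (p : Int × List String) :
    List Int × Int × Int :=
  let head := PySem.List.pyGetD p.2 0 ""
  let f12 := if p.1 ≠ 0 then
      (match PySem.Dict.get? pvFlip12 head with
       | some b => if b then 1 - st.2.2 else st.2.2
       | none => st.2.1)
    else st.2.1
  let f24 := match PySem.Dict.get? pvFlip24 head with
    | some b => if b then 1 - f12 else f12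
    | none => st.2.2
  let cnt := ((PySem.List.slice p.2 none (some W)).map
      (fun ch => if ch = "n" ∨ ch = "s" then (1:Int) else 0)).sum
  (st.1 ++ [f12], if PySem.Int.mod cnt 2 ≠ 0 then 1 - f12 else f12, f24)

def stacking_order_alt (news_list : List (List String)) : List (List Int) :=
  let M : Int := (news_list.length : Int) + 1
  let W : Int := ((PySem.List.pyGetD news_list 0 []).length : Int)
  if W = 0 then []
  else
    let seeds := ((PySem.List.enumerate news_list 0).foldl (pvSeedRow W) ([], 0, 2)).1
    (PySem.List.enumerate (seeds.zip news_list) 0).flatMap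
      (fun p => pvRowLayers M p.1 p.2.1 (PySem.List.slice p.2.2 none (some W)))

-- ===== PRECONDITION & SPEC =====
-- Pre_ excludes exactly the inputs on which Python A raises IndexError:
-- the empty grid (news_list[0]) and grids with a row shorter than the first row.
def Pre_stacking_order (news_list : List (List String)) : Prop :=
  news_list ≠ [] ∧ ∀ row ∈ news_list, (news_list.headD []).length ≤ row.length
instance (news_list : List (List String)) : Decidable (Pre_stacking_order news_list) := by
  unfold Pre_stacking_order; infer_instance

def pvWitness_stacking_order : List (List String) :=
  [["n", "e"], ["s", "w"]]

def Spec_stacking_order (news_list : List (List String)) (out : List (List Int)) : Prop :=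
  out = stacking_order_alt news_list
instance (news_list : List (List String)) (out : List (List Int)) :
    Decidable (Spec_stacking_order news_list out) := by
  unfold Spec_stacking_order; infer_instance

-- ===== CLAIM (what is proved, stated in full; the proofs are below) =====
def Claim_equal_stacking_order : Prop :=
  ∀ (news_list : List (List String)), Dom_stacking_order news_list →
    Pre_stacking_order news_list →
    Spec_stacking_order news_list (stacking_order news_list)

-- ===== LEMMAS AND PROOFS =====
-- proof-only vocabulary
def pvToggle (n s : Int) : Int := if PySem.Int.mod n 2 ≠ 0 then 1 - s else s
def pvNS (cells : List String) : Int :=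
  (cells.map (fun ch => if ch = "n" ∨ ch = "s" then (1:Int) else 0)).sum

-- the seed list pass 1 computes, together with its final flags
def pvSeedList (W : Int) : List (Int × List String) → Int → Int → List Int × Int × Int
  | [], f12, f24 => ([], f12, f24)
  | (i, row) :: rest, f12, f24 =>
      let s := pvSeedA (PySem.List.pyGetD row 0 "") i f12 f24
      let r := pvSeedList W rest (pvToggle (pvNS (PySem.List.slice row none (some W))) s.1) s.2
      (s.1 :: r.1, r.2)

-- the common normal form of both programs, with its final flags
def pvSpec (M W : Int) : List (Int × List String) → Int → Int → List (List Int) × Int × Int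
  | [], f12, f24 => ([], f12, f24)
  | (i, row) :: rest, f12, f24 =>
      let s := pvSeedA (PySem.List.pyGetD row 0 "") i f12 f24
      let cells := PySem.List.slice row none (some W)
      let r := pvSpec M W rest (pvToggle (pvNS cells) s.1) s.2
      (pvRowLayers M i s.1 cells ++ r.1, r.2)

theorem pvSeedRow_eq (W : Int) (st : List Int × Int × Int) (p : Int × List String) :
    pvSeedRow W st p =
      (st.1 ++ [(pvSeedA (PySem.List.pyGetD p.2 0 "") p.1 st.2.1 st.2.2).1],
       pvToggle (pvNS (PySem.List.slice p.2 none (some W)))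
         (pvSeedA (PySem.List.pyGetD p.2 0 "") p.1 st.2.1 st.2.2).1,
       (pvSeedA (PySem.List.pyGetD p.2 0 "") p.1 st.2.1 st.2.2).2) := by
  obtain ⟨i, row⟩ := p
  obtain ⟨sAcc, f12, f24⟩ := st
  generalize hh : PySem.List.pyGetD row 0 "" = h
  simp only [pvSeedRow, pvSeedA, pvToggle, pvNS, hh]
  generalize hc : (List.map (fun ch => if ch = "n" ∨ ch = "s" then (1:Int) else 0)
      (PySem.List.slice row none (some W))).sum = cnt
  have g12n : pvFlip12.get? "n" = some false := by rfl
  have g12s : pvFlip12.get? "s" = some true := by rfl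
  have g12w : pvFlip12.get? "w" = some false := by rfl
  have g12e : pvFlip12.get? "e" = some true := by rfl
  have g24n : pvFlip24.get? "n" = some false := by rfl
  have g24s : pvFlip24.get? "s" = some true := by rfl
  have g24w : pvFlip24.get? "w" = some true := by rfl
  have g24e : pvFlip24.get? "e" = some false := by rfl
  by_cases hn : h = "n"
  · subst hn; simp [pvToggle, g12n, g24n]; try (split_ifs <;> first | rfl | ring)
  by_cases hs : h = "s"
  · subst hs; simp [pvToggle, g12s, g24s]; try (split_ifs <;> first | rfl | ring)
  by_cases hw : h = "w"
  · subst hw; simp [pvToggle, g12w, g24w]; try (split_ifs <;> first | rfl | ring)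
  by_cases he : h = "e"
  · subst he; simp [pvToggle, g12e, g24e]; try (split_ifs <;> first | rfl | ring)
  have h12 : PySem.Dict.get? pvFlip12 h = none := by
    have hit : pvFlip12.items = [("n", false), ("s", true), ("w", false), ("e", true)] := by rfl
    simp [PySem.Dict.get?, hit, beq_iff_eq, Ne.symm hn, Ne.symm hs, Ne.symm hw, Ne.symm he]
  have h24 : PySem.Dict.get? pvFlip24 h = none := by
    have hit : pvFlip24.items = [("n", false), ("s", true), ("w", true), ("e", false)] := by rfl
    simp [PySem.Dict.get?, hit, beq_iff_eq, Ne.symm hn, Ne.symm hs, Ne.symm hw, Ne.symm he]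
  simp [pvToggle, h12, h24, hn, hs, hw, he]; try (split_ifs <;> first | rfl | ring)

theorem pvSeedFold (W : Int) (l : List (Int × List String)) :
    ∀ (sAcc : List Int) (f12 f24 : Int),
      l.foldl (pvSeedRow W) (sAcc, f12, f24) =
        (sAcc ++ (pvSeedList W l f12 f24).1, (pvSeedList W l f12 f24).2) := by
  induction l with
  | nil => intro sAcc f12 f24; simp [pvSeedList]
  | cons p rest ih =>
      intro sAcc f12 f24
      obtain ⟨i, row⟩ := p
      rw [List.foldl_cons, pvSeedRow_eq, ih]
      simp [pvSeedList]

theorem pvCell_ne_zero (M i j : Int) (hj : j ≠ 0) (ch : String)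
    (acc : List (List Int)) (pref seed f24 : Int) :
    pvCellA M i j ch (acc, pvToggle pref seed, f24) =
      ((pvRowCell M i seed (acc, pref) (j, ch)).1,
       pvToggle ((pvRowCell M i seed (acc, pref) (j, ch)).2) seed, f24) := by
  have hmm : ∀ x : Int, PySem.Int.mod x 2 = x % 2 :=
    fun x => PySem.Int.mod_eq_emod_of_pos (by norm_num)
  have gn : pvQuadTable.get? "n" = some [1,0,2,3] := by rfl
  have gs : pvQuadTable.get? "s" = some [2,3,1,0] := by rfl
  have gw : pvQuadTable.get? "w" = some [3,1,0,2] := by rfl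
  have ge : pvQuadTable.get? "e" = some [1,3,2,0] := by rfl
  have hm2 : pref % 2 = 0 ∨ pref % 2 = 1 := Int.emod_two_eq_zero_or_one pref
  by_cases hn : ch = "n"
  · subst hn
    simp only [pvCellA, pvEmitA, pvRowCell, pvToggle, gn, hmm, hj, if_neg, if_false]
    rcases hm2 with hm | hm <;>
      simp [hj, hm, show pref % 2 = 0 → ¬(pref+1) % 2 = 0 from by omega,
        show (pref+1) % 2 = 0 ↔ ¬ pref % 2 = 0 from by omega] <;>
      split_ifs <;> first | rfl | trivial | (exact ⟨trivial, trivial⟩) | ring | omega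
  by_cases hs : ch = "s"
  · subst hs
    simp only [pvCellA, pvEmitA, pvRowCell, pvToggle, gs, hmm, hj, if_neg, if_false]
    rcases hm2 with hm | hm <;>
      simp [hj, hm, show (pref+1) % 2 = 0 ↔ ¬ pref % 2 = 0 from by omega] <;>
      split_ifs <;> first | rfl | trivial | (exact ⟨trivial, trivial⟩) | ring | omega
  by_cases hw : ch = "w"
  · subst hw
    simp only [pvCellA, pvEmitA, pvRowCell, pvToggle, gw, hmm, hj, if_neg, if_false]
    rcases hm2 with hm | hm <;> simp [hj, hm] <;> split_ifs <;> first | rfl | trivial | (exact ⟨trivial, trivial⟩) | ring | omega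
  by_cases he : ch = "e"
  · subst he
    simp only [pvCellA, pvEmitA, pvRowCell, pvToggle, ge, hmm, hj, if_neg, if_false]
    rcases hm2 with hm | hm <;> simp [hj, hm] <;> split_ifs <;> first | rfl | trivial | (exact ⟨trivial, trivial⟩) | ring | omega
  have hq : PySem.Dict.get? pvQuadTable ch = none := by
    have hit : pvQuadTable.items =
        [("n", ([1,0,2,3] : List Nat)), ("s", [2,3,1,0]), ("w", [3,1,0,2]), ("e", [1,3,2,0])] := by rfl
    simp [PySem.Dict.get?, hit, beq_iff_eq, Ne.symm hn, Ne.symm hs, Ne.symm hw, Ne.symm he]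
  simp [pvCellA, pvEmitA, pvRowCell, pvToggle, hq, hj, hn, hs, hw, he]
  try (split_ifs <;> first | rfl | trivial | (exact ⟨trivial, trivial⟩) | ring | omega)

theorem pvRowTail (M i : Int) (cells : List String) :
    ∀ (j0 : Int), 1 ≤ j0 → ∀ (acc : List (List Int)) (pref seed f24 : Int),
      (PySem.List.enumerate cells j0).foldl (fun st p => pvCellA M i p.1 p.2 st)
          (acc, pvToggle pref seed, f24) =
        (((PySem.List.enumerate cells j0).foldl (pvRowCell M i seed) (acc, pref)).1,
         pvToggle (((PySem.List.enumerate cells j0).foldl (pvRowCell M i seed) (acc, pref)).2) seed,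
         f24) := by
  induction cells with
  | nil => intro j0 hj0 acc pref seed f24; simp [PySem.List.enumerate_nil]
  | cons c cs ih =>
      intro j0 hj0 acc pref seed f24
      rw [PySem.List.enumerate_cons, List.foldl_cons, List.foldl_cons,
        pvCell_ne_zero M i j0 (by omega) c acc pref seed f24]
      have := ih (j0 + 1) (by omega)
        ((pvRowCell M i seed (acc, pref) (j0, c)).1)
        ((pvRowCell M i seed (acc, pref) (j0, c)).2) seed f24
      simpa using this

theorem pvRowSplit (M i seed : Int) (l : List (Int × String)) :
    ∀ (acc : List (List Int)) (pref : Int),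
      l.foldl (pvRowCell M i seed) (acc, pref) =
        (acc ++ (l.foldl (pvRowCell M i seed) ([], pref)).1,
         (l.foldl (pvRowCell M i seed) ([], pref)).2) := by
  induction l with
  | nil => intro acc pref; simp
  | cons p rest ih =>
      intro acc pref
      have hstep : ∀ (a : List (List Int)) (q : Int),
          pvRowCell M i seed (a, q) p =
            (a ++ (pvRowCell M i seed ([], q) p).1, (pvRowCell M i seed ([], q) p).2) := by
        intro a q
        cases hg : PySem.Dict.get? pvQuadTable p.2 <;> simp [pvRowCell, hg]
      rw [List.foldl_cons, List.foldl_cons, hstep, ih, ih ((pvRowCell M i seed ([], pref) p).1)]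
      simp

theorem pvRowPref (M i seed : Int) (cells : List String) :
    ∀ (j0 : Int) (acc : List (List Int)) (pref : Int),
      ((PySem.List.enumerate cells j0).foldl (pvRowCell M i seed) (acc, pref)).2 =
        pref + pvNS cells := by
  induction cells with
  | nil => intro j0 acc pref; simp [PySem.List.enumerate_nil, pvNS]
  | cons c cs ih =>
      intro j0 acc pref
      rw [PySem.List.enumerate_cons, List.foldl_cons, ih]
      by_cases hc : c = "n" ∨ c = "s" <;> simp [pvRowCell, hc, pvNS] <;> ring

theorem pvFirstCell (M i : Int) (c : String) (acc : List (List Int)) (f12 f24 : Int) :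
    pvCellA M i 0 c (acc, f12, f24) =
      ((pvRowCell M i (pvSeedA c i f12 f24).1 (acc, 0) (0, c)).1,
       pvToggle ((pvRowCell M i (pvSeedA c i f12 f24).1 (acc, 0) (0, c)).2)
         (pvSeedA c i f12 f24).1,
       (pvSeedA c i f12 f24).2) := by
  have gn : pvQuadTable.get? "n" = some [1,0,2,3] := by rfl
  have gs : pvQuadTable.get? "s" = some [2,3,1,0] := by rfl
  have gw : pvQuadTable.get? "w" = some [3,1,0,2] := by rfl
  have ge : pvQuadTable.get? "e" = some [1,3,2,0] := by rfl
  by_cases hn : c = "n"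
  · subst hn; simp [pvCellA, pvEmitA, pvRowCell, pvToggle, pvSeedA, gn]
    try split_ifs <;> first | rfl | trivial | (exact ⟨trivial, trivial⟩) | ring | omega
  by_cases hs : c = "s"
  · subst hs; simp [pvCellA, pvEmitA, pvRowCell, pvToggle, pvSeedA, gs]
    try split_ifs <;> first | rfl | trivial | (exact ⟨trivial, trivial⟩) | ring | omega
  by_cases hw : c = "w"
  · subst hw; simp [pvCellA, pvEmitA, pvRowCell, pvToggle, pvSeedA, gw]
    try split_ifs <;> first | rfl | trivial | (exact ⟨trivial, trivial⟩) | ring | omega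
  by_cases he : c = "e"
  · subst he; simp [pvCellA, pvEmitA, pvRowCell, pvToggle, pvSeedA, ge]
    try split_ifs <;> first | rfl | trivial | (exact ⟨trivial, trivial⟩) | ring | omega
  have hq : PySem.Dict.get? pvQuadTable c = none := by
    have hit : pvQuadTable.items =
        [("n", ([1,0,2,3] : List Nat)), ("s", [2,3,1,0]), ("w", [3,1,0,2]), ("e", [1,3,2,0])] := by rfl
    simp [PySem.Dict.get?, hit, beq_iff_eq, Ne.symm hn, Ne.symm hs, Ne.symm hw, Ne.symm he]
  simp [pvCellA, pvEmitA, pvRowCell, pvToggle, pvSeedA, hq, hn, hs, hw, he]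
  try (split_ifs <;> first | rfl | trivial | (exact ⟨trivial, trivial⟩) | ring | omega)

theorem pvRowFull (M i : Int) (c : String) (cs : List String)
    (acc : List (List Int)) (f12 f24 : Int) :
    (PySem.List.enumerate (c :: cs) 0).foldl (fun st p => pvCellA M i p.1 p.2 st)
        (acc, f12, f24) =
      (acc ++ pvRowLayers M i (pvSeedA c i f12 f24).1 (c :: cs),
       pvToggle (pvNS (c :: cs)) (pvSeedA c i f12 f24).1,
       (pvSeedA c i f12 f24).2) := by
  rw [PySem.List.enumerate_cons, List.foldl_cons]
  dsimp only
  rw [pvFirstCell]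
  simp only [zero_add]
  rw [pvRowTail M i cs 1 (by omega)]
  have hR : ((pvRowCell M i (pvSeedA c i f12 f24).1 (acc, 0) (0, c)).1,
      (pvRowCell M i (pvSeedA c i f12 f24).1 (acc, 0) (0, c)).2) =
      pvRowCell M i (pvSeedA c i f12 f24).1 (acc, 0) (0, c) := rfl
  rw [hR]
  have hfold : (PySem.List.enumerate cs 1).foldl (pvRowCell M i (pvSeedA c i f12 f24).1)
      (pvRowCell M i (pvSeedA c i f12 f24).1 (acc, 0) (0, c)) =
      (PySem.List.enumerate (c :: cs) 0).foldl (pvRowCell M i (pvSeedA c i f12 f24).1) (acc, 0) := by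
    rw [PySem.List.enumerate_cons, List.foldl_cons]; norm_num
  rw [hfold, pvRowSplit, pvRowPref]
  simp [pvRowLayers, pvRowSplit, pvRowPref]

theorem pvOuterA (M : Int) (W : Nat) (hW : 1 ≤ W) (rows : List (List String)) :
    ∀ (i0 : Int) (acc : List (List Int)) (f12 f24 : Int),
      (∀ r ∈ rows, W ≤ r.length) →
      (PySem.List.enumerate rows i0).foldl (fun st p =>
          (PySem.List.pyRange 0 (W : Int) 1).foldl (fun st2 j =>
            pvCellA M p.1 j (PySem.List.pyGetD p.2 j "") st2) st)
        (acc, f12, f24) =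
      (acc ++ (pvSpec M (W : Int) (PySem.List.enumerate rows i0) f12 f24).1,
       (pvSpec M (W : Int) (PySem.List.enumerate rows i0) f12 f24).2) := by
  induction rows with
  | nil => intro i0 acc f12 f24 _; simp [PySem.List.enumerate_nil, pvSpec]
  | cons row rest ih =>
      intro i0 acc f12 f24 hlen
      rw [PySem.List.enumerate_cons, List.foldl_cons]
      have hWlen : W ≤ row.length := hlen row (by simp)
      have htake : (row.take W).length = W := by simp [hWlen]
      obtain ⟨c, cs, hcc⟩ : ∃ c cs, row.take W = c :: cs := by
        cases h : row.take W with
        | nil => exfalso; rw [h] at htake; simp at htake; omega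
        | cons c cs => exact ⟨c, cs, rfl⟩
      -- turn A's index loop over the row into a loop over enumerate (row.take W)
      have hconv : (PySem.List.pyRange 0 (W : Int) 1).foldl (fun st2 j =>
            pvCellA M i0 j (PySem.List.pyGetD row j "") st2) (acc, f12, f24) =
          (PySem.List.enumerate (row.take W) 0).foldl
            (fun st p => pvCellA M i0 p.1 p.2 st) (acc, f12, f24) := by
        rw [PySem.List.enumerate_eq_map_pyRange (d := ""), List.foldl_map]
        simp only [htake, PySem.List.len_eq]
        apply PySem.List.foldl_congr_mem
        intro st j hj
        rw [PySem.List.mem_pyRange_one] at hj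
        have hget : PySem.List.pyGetD (row.take W) j "" = PySem.List.pyGetD row j "" := by
          rw [PySem.List.pyGetD_eq_getElem (List.take W row) "" (by omega)
                (by rw [htake]; exact_mod_cast hj.2),
              PySem.List.pyGetD_eq_getElem row "" (by omega)
                (by have : (W : Int) ≤ (row.length : Int) := by exact_mod_cast hWlen
                    omega)]
          exact List.getElem_take
        rw [hget]
      rw [hconv, hcc, pvRowFull]
      have hhead : PySem.List.pyGetD row 0 "" = c := by
        have : row.take W ≠ [] := by rw [hcc]; simp
        cases row with
        | nil => simp at htake; omega
        | cons r0 rs =>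
            have : c = r0 := by
              cases W with
              | zero => omega
              | succ w => simp [List.take] at hcc; exact hcc.1.symm
            rw [this]; exact PySem.List.pyGetD_zero_cons r0 rs ""
      rw [ih (i0 + 1) _ _ _ (fun r hr => hlen r (by simp [hr]))]
      simp [pvSpec, hhead, hcc]

theorem pvFlatEq (M : Int) (W : Int) (rows : List (List String)) :
    ∀ (i0 : Int) (f12 f24 : Int),
      (PySem.List.enumerate
          (((pvSeedList W (PySem.List.enumerate rows i0) f12 f24).1).zip rows) i0).flatMap
        (fun p => pvRowLayers M p.1 p.2.1 (PySem.List.slice p.2.2 none (some W))) =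
      (pvSpec M W (PySem.List.enumerate rows i0) f12 f24).1 := by
  induction rows with
  | nil => intro i0 f12 f24; simp [PySem.List.enumerate_nil, pvSeedList, pvSpec]
  | cons row rest ih =>
      intro i0 f12 f24
      rw [PySem.List.enumerate_cons]
      simp only [pvSeedList, pvSpec, List.zip_cons_cons, PySem.List.enumerate_cons,
        List.flatMap_cons]
      rw [ih (i0 + 1)]

-- ===== VERDICT =====
theorem stacking_order_spec : Claim_equal_stacking_order := by
  intro nl _ hPre
  obtain ⟨hne, hlen⟩ := hPre
  cases nl with
  | nil => exact absurd rfl hne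
  | cons r0 rest =>
      unfold Spec_stacking_order stacking_order stacking_order_alt
      by_cases hW : r0.length = 0
      · -- first row empty: A's inner loops are empty, B returns [] by its guard
        simp only [PySem.List.pyGetD_zero_cons, hW]
        have hfix : ∀ (l : List Int) (st : List (List Int) × Int × Int),
            l.foldl (fun st _ => st) st = st := by
          intro l; induction l with
          | nil => intro st; rfl
          | cons x xs ih => intro st; rw [List.foldl_cons]; exact ih st
        rw [show PySem.List.pyRange 0 (((0:Nat) : Int) + 1 - 1) = [] from
          PySem.List.pyRange_one_eq_nil (by norm_num)]
        simp [hfix]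
      · have hWpos : 1 ≤ r0.length := by omega
        simp only [PySem.List.pyGetD_zero_cons]
        have hMN : ((r0 :: rest).length : Int) + 1 - 1 = ((r0 :: rest).length : Int) := by ring
        have hN : ((r0.length : Int) + 1 - 1) = (r0.length : Int) := by ring
        rw [hMN, hN]
        have hif : ¬ ((r0.length : Int) = 0) := by exact_mod_cast hW
        rw [if_neg hif]
        -- A: outer index loop → enumerate loop
        have houter : (PySem.List.pyRange 0 ((r0 :: rest).length : Int) 1).foldl (fun st i =>
              (PySem.List.pyRange 0 (r0.length : Int) 1).foldl (fun st2 j =>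
                pvCellA (((r0 :: rest).length : Int) + 1) i j
                  (PySem.List.pyGetD (PySem.List.pyGetD (r0 :: rest) i []) j "") st2) st)
            (([] : List (List Int)), (0:Int), (2:Int)) =
            (PySem.List.enumerate (r0 :: rest) 0).foldl (fun st p =>
              (PySem.List.pyRange 0 (r0.length : Int) 1).foldl (fun st2 j =>
                pvCellA (((r0 :: rest).length : Int) + 1) p.1 j (PySem.List.pyGetD p.2 j "") st2) st)
            (([] : List (List Int)), (0:Int), (2:Int)) := by
          rw [PySem.List.enumerate_eq_map_pyRange (d := ([] : List String)), List.foldl_map]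
          simp [PySem.List.len_eq]
        rw [houter, pvOuterA (((r0 :: rest).length : Int) + 1) r0.length hWpos (r0 :: rest) 0 [] 0 2
          (by intro r hr; have := hlen r hr; simpa using this)]
        rw [pvSeedFold (r0.length : Int) (PySem.List.enumerate (r0 :: rest) 0) [] 0 2]
        simp only [List.nil_append]
        rw [pvFlatEq (((r0 :: rest).length : Int) + 1) (r0.length : Int) (r0 :: rest) 0 0 2]
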